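-- pv_equiv track=rewrite | github.com/msbharathurs/statlot-649 | statlot/4d/check_wins.py | tier_of
-- ===== SOURCE A (Python) =====
-- def tier_of(num, draw):
--     if num == draw.get("prize_1st"): return "1st Prize 🥇"
--     if num == draw.get("prize_2nd"): return "2nd Prize 🥈"
--     if num == draw.get("prize_3rd"): return "3rd Prize 🥉"
--     for i in range(1,11):
--         if num == draw.get(f"starter_{i}"): return "Starter"
--     for i in range(1,11):
--         if num == draw.get(f"consolation_{i}"): return "Consolation"
--     return None
-- ===== SOURCE B (Python) =====
-- PAIRS = (
--     [("prize_1st", "1st Prize \U0001F947"),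
--      ("prize_2nd", "2nd Prize \U0001F948"),
--      ("prize_3rd", "3rd Prize \U0001F949")]
--     + [(f"starter_{i}", "Starter") for i in range(1, 11)]
--     + [(f"consolation_{i}", "Consolation") for i in range(1, 11)]
-- )
--
-- def tier_of(num, draw):
--     mapping = {}
--     for key, label in reversed(PAIRS):
--         if key in draw:
--             mapping[draw[key]] = label
--     return mapping.get(num)
-- ===== Notes on version B (the rewrite author's own statement) =====
-- stated objective: idiomatic
-- what changed: Replaces A's 23 sequential comparisons (if-chain plus two range loops with early return) by a data-driven table: one ordered (key,label) list, a value-to-label dict built by iterating it in reverse priority so higher tiers overwrite on collisions, and a single dict lookup.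
import Mathlib
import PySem

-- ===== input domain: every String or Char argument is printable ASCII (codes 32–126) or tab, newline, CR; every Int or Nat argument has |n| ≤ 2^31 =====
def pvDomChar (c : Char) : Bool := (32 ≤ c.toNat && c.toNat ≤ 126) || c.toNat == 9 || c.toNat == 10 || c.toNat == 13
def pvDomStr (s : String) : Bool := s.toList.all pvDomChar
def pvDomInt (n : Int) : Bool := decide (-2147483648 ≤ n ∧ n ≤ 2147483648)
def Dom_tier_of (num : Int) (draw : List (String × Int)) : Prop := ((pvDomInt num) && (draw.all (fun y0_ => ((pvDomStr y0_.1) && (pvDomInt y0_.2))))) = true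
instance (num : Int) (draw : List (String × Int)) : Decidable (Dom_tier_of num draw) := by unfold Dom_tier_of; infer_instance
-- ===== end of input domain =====

-- B replaces A's 23 sequential comparisons by a value→label dict built once in
-- reverse priority order, then a single lookup (idiomatic; same exact result).

-- ===== PORT A =====
-- `for i in range(1,11): if num == draw.get(f"{pre}{i}"): return label`, falling
-- through to `fallback` (the code after the loop) when no i matches
def pvScan (d : PySem.Dict String Int) (num : Int) (pre : String) (label : String)
    (fallback : Option String) : List Int → Option String
  | [] => fallback
  | i :: is =>
    if d.get? (pre ++ PySem.Int.toStr i) == some num then some label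
    else pvScan d num pre label fallback is

def tier_of (num : Int) (draw : List (String × Int)) : Option String :=
  if (PySem.Dict.mk draw).get? "prize_1st" == some num then some "1st Prize 🥇"
  else if (PySem.Dict.mk draw).get? "prize_2nd" == some num then some "2nd Prize 🥈"
  else if (PySem.Dict.mk draw).get? "prize_3rd" == some num then some "3rd Prize 🥉"
  else pvScan (PySem.Dict.mk draw) num "starter_" "Starter"
    (pvScan (PySem.Dict.mk draw) num "consolation_" "Consolation"
      none (PySem.List.pyRange 1 11 1))
    (PySem.List.pyRange 1 11 1)

-- ===== PORT B =====
def pvPairs : List (String × String) :=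
  [("prize_1st", "1st Prize 🥇"), ("prize_2nd", "2nd Prize 🥈"), ("prize_3rd", "3rd Prize 🥉"),
   ("starter_1", "Starter"), ("starter_2", "Starter"), ("starter_3", "Starter"),
   ("starter_4", "Starter"), ("starter_5", "Starter"), ("starter_6", "Starter"),
   ("starter_7", "Starter"), ("starter_8", "Starter"), ("starter_9", "Starter"),
   ("starter_10", "Starter"),
   ("consolation_1", "Consolation"), ("consolation_2", "Consolation"),
   ("consolation_3", "Consolation"), ("consolation_4", "Consolation"),
   ("consolation_5", "Consolation"), ("consolation_6", "Consolation"),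
   ("consolation_7", "Consolation"), ("consolation_8", "Consolation"),
   ("consolation_9", "Consolation"), ("consolation_10", "Consolation")]

def tier_of_alt (num : Int) (draw : List (String × Int)) : Option String :=
  (pvPairs.reverse.foldl
    (fun m kl =>
      match (PySem.Dict.mk draw).get? kl.1 with
      | some v => m.insert v kl.2
      | none => m)
    PySem.Dict.empty).get? num

-- ===== PRECONDITION & SPEC =====
def Spec_tier_of (num : Int) (draw : List (String × Int)) (out : Option String) : Prop := out = tier_of_alt num draw
instance (num : Int) (draw : List (String × Int)) (out : Option String) : Decidable (Spec_tier_of num draw out) := by unfold Spec_tier_of; infer_instance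

-- ===== CLAIM (what is proved, stated in full; the proofs are below) =====
def Claim_equal_tier_of : Prop := ∀ (num : Int) (draw : List (String × Int)), Dom_tier_of num draw → Spec_tier_of num draw (tier_of num draw)

-- ===== LEMMAS AND PROOFS =====

-- priority-ordered first match over (key, label) pairs
def pvFirst (d : PySem.Dict String Int) (num : Int) : List (String × String) → Option String
  | [] => none
  | kl :: ps => if d.get? kl.1 == some num then some kl.2 else pvFirst d num ps

-- B's reverse-order dict build, looked up at num, is the priority-ordered first match
theorem pvBuild_get (d : PySem.Dict String Int) (num : Int) (ps : List (String × String)) :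
    (ps.reverse.foldl
      (fun m kl =>
        match d.get? kl.1 with
        | some v => m.insert v kl.2
        | none => m)
      PySem.Dict.empty).get? num
    = pvFirst d num ps := by
  induction ps with
  | nil => exact PySem.Dict.get?_empty num
  | cons kl ps ih =>
    rw [List.reverse_cons, List.foldl_append, List.foldl_cons, List.foldl_nil]
    simp only [pvFirst]
    cases hv : d.get? kl.1 with
    | none => exact ih
    | some v =>
      have hstep : ∀ (m : PySem.Dict Int String),
          (match (some v : Option Int) with
           | some w => m.insert w kl.2
           | none => m) = m.insert v kl.2 := fun _ => rfl
      rw [hstep, PySem.Dict.get?_insert]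
      by_cases h : num = v
      · subst h
        rw [if_pos rfl, if_pos (beq_self_eq_true _)]
      · have hb : (some v == some num) = false := by
          simp only [beq_eq_false_iff_ne, ne_eq, Option.some.injEq]
          exact fun e => h e.symm
        rw [if_neg h, hb]
        exact ih

-- ===== VERDICT (by name: the statement is the Claim_ definition above) =====
theorem tier_of_spec : Claim_equal_tier_of := by
  intro num draw _
  show tier_of num draw = tier_of_alt num draw
  unfold tier_of tier_of_alt
  rw [pvBuild_get,
      show PySem.List.pyRange 1 11 1 = [1,2,3,4,5,6,7,8,9,10] from by decide]
  simp only [pvScan, pvFirst, pvPairs,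
    show ("starter_" ++ PySem.Int.toStr 1 : String) = "starter_1" from by decide, show ("starter_" ++ PySem.Int.toStr 2 : String) = "starter_2" from by decide, show ("starter_" ++ PySem.Int.toStr 3 : String) = "starter_3" from by decide, show ("starter_" ++ PySem.Int.toStr 4 : String) = "starter_4" from by decide, show ("starter_" ++ PySem.Int.toStr 5 : String) = "starter_5" from by decide, show ("starter_" ++ PySem.Int.toStr 6 : String) = "starter_6" from by decide, show ("starter_" ++ PySem.Int.toStr 7 : String) = "starter_7" from by decide, show ("starter_" ++ PySem.Int.toStr 8 : String) = "starter_8" from by decide, show ("starter_" ++ PySem.Int.toStr 9 : String) = "starter_9" from by decide, show ("starter_" ++ PySem.Int.toStr 10 : String) = "starter_10" from by decide,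
    show ("consolation_" ++ PySem.Int.toStr 1 : String) = "consolation_1" from by decide, show ("consolation_" ++ PySem.Int.toStr 2 : String) = "consolation_2" from by decide, show ("consolation_" ++ PySem.Int.toStr 3 : String) = "consolation_3" from by decide, show ("consolation_" ++ PySem.Int.toStr 4 : String) = "consolation_4" from by decide, show ("consolation_" ++ PySem.Int.toStr 5 : String) = "consolation_5" from by decide, show ("consolation_" ++ PySem.Int.toStr 6 : String) = "consolation_6" from by decide, show ("consolation_" ++ PySem.Int.toStr 7 : String) = "consolation_7" from by decide, show ("consolation_" ++ PySem.Int.toStr 8 : String) = "consolation_8" from by decide, show ("consolation_" ++ PySem.Int.toStr 9 : String) = "consolation_9" from by decide, show ("consolation_" ++ PySem.Int.toStr 10 : String) = "consolation_10" from by decide]
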